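-- pv_equiv track=rewrite | github.com/bcgov/EPIC.search | search-api/src/search_api/services/search_handlers/agent/agent_stub.py | _group_execution_steps
-- ===== SOURCE A (Python) =====
-- from typing import Dict, Any, List, Optional
--
-- def _group_execution_steps(execution_plan: List[Dict[str, Any]]) -> List[List[int]]:
--     """Group consecutive parallelizable steps together for parallel execution.
--
--     Args:
--         execution_plan: List of execution steps
--
--     Returns:
--         List of groups, where each group is a list of step indices.
--         Non-parallelizable steps are in individual groups, parallelizable steps are grouped together.
--         Search steps and validate_chunks_relevance steps can be parallelized.
--     """
--     groups = []
--     search_steps = []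
--     validation_steps = []
--
--     for i, step in enumerate(execution_plan):
--         tool_name = step.get("tool")
--
--         if tool_name == "search":
--             search_steps.append(i)
--         elif tool_name == "validate_chunks_relevance":
--             validation_steps.append(i)
--         else:
--             # Before adding non-parallelizable step, close any open parallel groups
--             if search_steps:
--                 groups.append(search_steps)
--                 search_steps = []
--             if validation_steps:
--                 groups.append(validation_steps)
--                 validation_steps = []
--
--             # Add non-parallelizable step as individual group
--             groups.append([i])
--
--     # Close any remaining parallel groups at the end
--     if search_steps:
--         groups.append(search_steps)
--     if validation_steps:
--         groups.append(validation_steps)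
--
--     return groups
-- ===== SOURCE B (Python) =====
-- from typing import Dict, Any, List, Optional
--
-- _PARALLEL = ("search", "validate_chunks_relevance")
--
--
-- def _split_segment(tools):
--     """Split off the maximal leading run of parallelizable tools."""
--     for k, t in enumerate(tools):
--         if t not in _PARALLEL:
--             return tools[:k], tools[k:]
--     return tools, []
--
--
-- def _group_execution_steps(execution_plan: List[Dict[str, Any]]) -> List[List[int]]:
--     tools = [step.get("tool") for step in execution_plan]
--     groups = []
--     base = 0
--     while tools:
--         seg, rest = _split_segment(tools)
--         s = [base + j for j, t in enumerate(seg) if t == "search"]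
--         v = [base + j for j, t in enumerate(seg) if t == "validate_chunks_relevance"]
--         if s:
--             groups.append(s)
--         if v:
--             groups.append(v)
--         if rest:
--             groups.append([base + len(seg)])
--             rest = rest[1:]
--         base += len(seg) + 1
--         tools = rest
--     return groups
-- ===== Notes on version B (the rewrite author's own statement) =====
-- stated objective: alternative
-- what changed: Replaced A's single accumulate-and-flush fold (pending search/validation buckets flushed at each non-parallelizable step and at the end) by a two-phase segment walk: split the plan at each non-parallelizable boundary, and per segment emit the search-index list, the validation-index list, then the boundary singleton.
import Mathlib
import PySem

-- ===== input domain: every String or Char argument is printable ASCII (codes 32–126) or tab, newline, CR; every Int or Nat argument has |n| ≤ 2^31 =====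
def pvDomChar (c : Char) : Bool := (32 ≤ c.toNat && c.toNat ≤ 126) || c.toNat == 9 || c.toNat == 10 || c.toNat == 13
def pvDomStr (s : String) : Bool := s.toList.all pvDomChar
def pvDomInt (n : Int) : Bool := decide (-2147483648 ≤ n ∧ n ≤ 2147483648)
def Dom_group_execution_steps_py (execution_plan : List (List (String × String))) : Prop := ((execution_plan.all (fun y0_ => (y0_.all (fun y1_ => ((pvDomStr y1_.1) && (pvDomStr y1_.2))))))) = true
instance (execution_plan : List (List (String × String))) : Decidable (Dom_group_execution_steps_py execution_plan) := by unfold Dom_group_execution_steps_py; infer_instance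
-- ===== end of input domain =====

-- B replaces A's accumulate-and-flush fold by a two-phase segment walk (split at each
-- non-parallelizable boundary, emit the segment's search/validation index lists, then the
-- boundary singleton); objective: alternative decomposition, same exact output.

-- ===== PORT A =====

-- step.get("tool"): first-match lookup on the association list (dict convention)
def pvTool (step : List (String × String)) : Option String :=
  (step.find? (fun p => p.1 == "tool")).map (·.2)

-- loop body of A: state = (groups, search_steps, validation_steps)
def pvAStep (st : List (List Int) × List Int × List Int) (p : Int × List (String × String)) :
    List (List Int) × List Int × List Int :=
  let (groups, searchSteps, validationSteps) := st
  let tool := pvTool p.2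
  if tool == some "search" then
    (groups, searchSteps ++ [p.1], validationSteps)
  else if tool == some "validate_chunks_relevance" then
    (groups, searchSteps, validationSteps ++ [p.1])
  else
    let groups := if searchSteps.isEmpty then groups else groups ++ [searchSteps]
    let groups := if validationSteps.isEmpty then groups else groups ++ [validationSteps]
    (groups ++ [[p.1]], [], [])

def group_execution_steps_py (execution_plan : List (List (String × String))) : List (List Int) :=
  let st := (PySem.List.enumerate execution_plan).foldl pvAStep ([], [], [])
  -- final flush: close any remaining parallel groups
  let groups := if st.2.1.isEmpty then st.1 else st.1 ++ [st.2.1]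
  if st.2.2.isEmpty then groups else groups ++ [st.2.2]

-- ===== PORT B =====

def pvIsPar (t : Option String) : Bool :=
  t == some "search" || t == some "validate_chunks_relevance"

-- _split_segment: maximal leading run of parallelizable tools (List.span is exactly this scan)
def pvSplitSegment (tools : List (Option String)) : List (Option String) × List (Option String) :=
  List.span pvIsPar tools

-- the comprehension [base + j for j, t in enumerate(seg) if t == name]
def pvIdxOf (base : Int) (seg : List (Option String)) (name : String) : List Int :=
  match seg with
  | [] => []
  | t :: rest =>
    if t == some name then base :: pvIdxOf (base + 1) rest name
    else pvIdxOf (base + 1) rest name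

-- the while loop: one segment per iteration; rest[1:] is List.tail
def pvAltGo (base : Int) (tools : List (Option String)) : List (List Int) :=
  match tools with
  | [] => []
  | t :: ts =>
    let seg := (pvSplitSegment (t :: ts)).1
    let rest := (pvSplitSegment (t :: ts)).2
    let s := pvIdxOf base seg "search"
    let v := pvIdxOf base seg "validate_chunks_relevance"
    let flush := (if s.isEmpty then [] else [s]) ++ (if v.isEmpty then [] else [v])
    if rest.isEmpty then flush
    else flush ++ [[base + seg.length]] ++ pvAltGo (base + seg.length + 1) rest.tail
  termination_by tools.length
  decreasing_by
    have h1 : ((t :: ts).dropWhile pvIsPar).length ≤ (t :: ts).length :=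
      List.length_dropWhile_le _ _
    simp only [pvSplitSegment, List.span_eq_takeWhile_dropWhile, List.length_tail,
      List.length_cons] at *
    omega

def group_execution_steps_py_alt (execution_plan : List (List (String × String))) : List (List Int) :=
  pvAltGo 0 (execution_plan.map pvTool)

-- ===== PRECONDITION & SPEC =====
def Spec_group_execution_steps_py (execution_plan : List (List (String × String))) (out : List (List Int)) : Prop := out = group_execution_steps_py_alt execution_plan
instance (execution_plan : List (List (String × String))) (out : List (List Int)) : Decidable (Spec_group_execution_steps_py execution_plan out) := by unfold Spec_group_execution_steps_py; infer_instance

-- ===== CLAIM (what is proved, stated in full; the proofs are below) =====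
def Claim_equal_group_execution_steps_py : Prop := ∀ (execution_plan : List (List (String × String))), Dom_group_execution_steps_py execution_plan → Spec_group_execution_steps_py execution_plan (group_execution_steps_py execution_plan)

-- ===== LEMMAS AND PROOFS =====

-- final flush of A as a function of the final state
def pvFinish (st : List (List Int) × List Int × List Int) : List (List Int) :=
  let groups := if st.2.1.isEmpty then st.1 else st.1 ++ [st.2.1]
  if st.2.2.isEmpty then groups else groups ++ [st.2.2]

-- folding A's body over an all-parallel segment only extends the two pending lists
theorem pvFold_seg (seg : List (List (String × String))) :
    ∀ (base : Int) (g : List (List Int)) (s v : List Int),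
    (∀ x ∈ seg, pvIsPar (pvTool x) = true) →
    (PySem.List.enumerate seg base).foldl pvAStep (g, s, v) =
      (g, s ++ pvIdxOf base (seg.map pvTool) "search",
          v ++ pvIdxOf base (seg.map pvTool) "validate_chunks_relevance") := by
  induction seg with
  | nil => intro base g s v _; simp [PySem.List.enumerate_nil, pvIdxOf]
  | cons x xs ih =>
    intro base g s v hall
    have hx := hall x (List.mem_cons_self)
    rw [PySem.List.enumerate_cons, List.foldl_cons]
    simp only [pvIsPar, Bool.or_eq_true, beq_iff_eq] at hx
    rcases hx with h | h
    · have h2 : pvTool x ≠ some "validate_chunks_relevance" := by simp [h]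
      rw [show pvAStep (g, s, v) (base, x) = (g, s ++ [base], v) by simp [pvAStep, h]]
      rw [ih (base + 1) g (s ++ [base]) v (fun y hy => hall y (List.mem_cons_of_mem _ hy))]
      simp [pvIdxOf, h]
    · have h1 : pvTool x ≠ some "search" := by simp [h]
      rw [show pvAStep (g, s, v) (base, x) = (g, s, v ++ [base]) by simp [pvAStep, h]]
      rw [ih (base + 1) g s (v ++ [base]) (fun y hy => hall y (List.mem_cons_of_mem _ hy))]
      simp [pvIdxOf, h]

-- main invariant: finishing A's fold started at state (g, [], []) equals g ++ B's segment walk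
theorem pvMain (plan : List (List (String × String))) :
    ∀ (base : Int) (g : List (List Int)),
    pvFinish ((PySem.List.enumerate plan base).foldl pvAStep (g, [], [])) =
      g ++ pvAltGo base (plan.map pvTool) := by
  induction hn : plan.length using Nat.strong_induction_on generalizing plan with
  | _ n ih =>
  intro base g
  obtain ⟨seg, hseg⟩ : ∃ s, List.takeWhile (fun x => pvIsPar (pvTool x)) plan = s := ⟨_, rfl⟩
  obtain ⟨rest, hrest⟩ : ∃ r, List.dropWhile (fun x => pvIsPar (pvTool x)) plan = r := ⟨_, rfl⟩
  have hsplit : plan = seg ++ rest := by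
    rw [← hseg, ← hrest, List.takeWhile_append_dropWhile]
  have hsegall : ∀ x ∈ seg, pvIsPar (pvTool x) = true := by
    intro x hx; rw [← hseg] at hx
    exact List.mem_takeWhile_imp (p := fun y => pvIsPar (pvTool y)) hx
  have hmapsplit : List.takeWhile pvIsPar (List.map pvTool plan) = List.map pvTool seg := by
    rw [List.takeWhile_map]
    simp only [Function.comp_def]
    rw [hseg]
  have hmapdrop : List.dropWhile pvIsPar (List.map pvTool plan) = List.map pvTool rest := by
    rw [List.dropWhile_map]
    simp only [Function.comp_def]
    rw [hrest]
  conv_lhs => rw [hsplit]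
  rw [PySem.List.enumerate_append, List.foldl_append,
      pvFold_seg seg base g [] [] hsegall]
  simp only [List.nil_append]
  cases plan with
  | nil =>
    have hsegnil : seg = [] := by
      rw [← hseg]; simp
    have hrestnil : rest = [] := by
      rw [← hrest]; simp
    rw [pvAltGo.eq_def]
    simp [hsegnil, hrestnil, PySem.List.enumerate_nil, pvFinish, pvIdxOf]
  | cons p ps =>
    rw [show List.map pvTool (p :: ps) = pvTool p :: List.map pvTool ps from rfl]
    rw [pvAltGo.eq_def]
    simp only [pvSplitSegment, List.span_eq_takeWhile_dropWhile]
    rw [show pvTool p :: List.map pvTool ps = List.map pvTool (p :: ps) from rfl]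
    rw [hmapsplit, hmapdrop]
    cases rest with
    | nil =>
      simp only [List.map_nil, List.isEmpty_nil, if_true, PySem.List.enumerate_nil,
        List.foldl_nil, pvFinish]
      split_ifs <;> simp_all
    | cons x rest' =>
      have hxnp : pvIsPar (pvTool x) = false := by
        have hne : List.dropWhile (fun y => pvIsPar (pvTool y)) (p :: ps) ≠ [] := by
          rw [hrest]; simp
        have := List.head_dropWhile_not (p := fun y => pvIsPar (pvTool y)) (l := p :: ps) hne
        simp only [hrest, List.head_cons] at this
        simpa using this
      rw [PySem.List.enumerate_cons, List.foldl_cons]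
      have h1 : pvTool x ≠ some "search" := by
        intro hc; simp [pvIsPar, hc] at hxnp
      have h2 : pvTool x ≠ some "validate_chunks_relevance" := by
        intro hc; simp [pvIsPar, hc] at hxnp
      have hxstep : pvAStep (g, pvIdxOf base (seg.map pvTool) "search",
          pvIdxOf base (seg.map pvTool) "validate_chunks_relevance") (base + seg.length, x) =
          ((g ++ (if (pvIdxOf base (seg.map pvTool) "search").isEmpty then []
                  else [pvIdxOf base (seg.map pvTool) "search"]) ++
               (if (pvIdxOf base (seg.map pvTool) "validate_chunks_relevance").isEmpty then []
                  else [pvIdxOf base (seg.map pvTool) "validate_chunks_relevance"])) ++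
            [[base + seg.length]], [], []) := by
        simp [pvAStep, h1, h2]
        split_ifs <;> simp
      rw [hxstep]
      have hlen : rest'.length < n := by
        have h3 : (List.dropWhile (fun y => pvIsPar (pvTool y)) (p :: ps)).length ≤
            (p :: ps).length := List.length_dropWhile_le _ _
        rw [hrest] at h3
        simp at h3 hn
        omega
      rw [ih rest'.length hlen rest' rfl (base + seg.length + 1)]
      simp only [List.map_cons, List.isEmpty_cons, List.tail_cons, List.length_map]
      simp [List.append_assoc]

-- ===== VERDICT (by name: the statement is the Claim_ definition above) =====
theorem group_execution_steps_py_spec : Claim_equal_group_execution_steps_py := by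
  intro plan _
  unfold Spec_group_execution_steps_py group_execution_steps_py group_execution_steps_py_alt
  have := pvMain plan 0 []
  simpa [pvFinish] using this
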